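-- pv_equiv track=rewrite | github.com/openwdl/wdl | wdl2_parser.py | _advance_line_col
-- ===== SOURCE A (Python) =====
-- def _advance_line_col(string, length, line, col):
--     for i in range(length):
--         if string[i] == '\n':
--             line += 1
--             col = 1
--         else:
--             col += 1
--     return (line, col)
-- ===== SOURCE B (Python) =====
-- def _advance_line_col(string, length, line, col):
--     if length <= 0:
--         return (line, col)
--     nl = string.count('\n', 0, length)
--     if nl == 0:
--         return (line, col + length)
--     p = string.rfind('\n', 0, length)
--     return (line + nl, length - p)
-- ===== Notes on version B (the rewrite author's own statement) =====
-- stated objective: simpler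
-- what changed: Replaces the per-character loop with a closed-form computation: count the newlines in the prefix and locate the last one with rfind, so line/col come from two substring scans instead of an explicit character-by-character state machine.
import Mathlib
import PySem

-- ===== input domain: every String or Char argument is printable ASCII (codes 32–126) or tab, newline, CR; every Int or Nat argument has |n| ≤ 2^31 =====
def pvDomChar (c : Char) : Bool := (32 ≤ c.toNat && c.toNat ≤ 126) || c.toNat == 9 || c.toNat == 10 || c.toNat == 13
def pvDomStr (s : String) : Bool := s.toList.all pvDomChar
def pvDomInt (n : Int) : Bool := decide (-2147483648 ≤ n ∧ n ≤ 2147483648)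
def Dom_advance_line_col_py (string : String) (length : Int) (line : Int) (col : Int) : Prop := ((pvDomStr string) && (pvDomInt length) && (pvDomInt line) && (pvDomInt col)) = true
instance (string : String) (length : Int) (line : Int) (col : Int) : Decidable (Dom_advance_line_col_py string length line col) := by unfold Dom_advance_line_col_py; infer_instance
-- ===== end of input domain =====

-- B replaces A's per-character line/col state machine by a closed form: count the
-- newlines in the prefix and locate the last one (rfind); same O(length) cost,
-- different decomposition. Pre_ excludes length > len(string), where A raises IndexError.

-- ===== PORT A =====
-- for i in range(length): if string[i] == '\n': line += 1; col = 1 else: col += 1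
-- string[i] ported as pyGetD (exact under Pre_: every i in range(length) is in range)
def advance_line_col_py (string : String) (length : Int) (line : Int) (col : Int) : Int × Int :=
  (PySem.List.pyRange 0 length 1).foldl
    (fun (st : Int × Int) i =>
      if PySem.List.pyGetD string.toList i ' ' == '\n' then (st.1 + 1, 1) else (st.1, st.2 + 1))
    (line, col)

-- ===== PORT B =====
def advance_line_col_py_alt (string : String) (length : Int) (line : Int) (col : Int) : Int × Int :=
  if length ≤ 0 then (line, col)
  else
    let pre := PySem.List.slice string.toList (some 0) (some length)   -- the searched window string[0:length]
    let nl := pre.count '\n'                                           -- string.count('\n', 0, length)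
    if nl == 0 then (line, col + length)
    else
      -- string.rfind('\n', 0, length): index of the LAST '\n' in the window; exact here since nl > 0
      let p : Int := (pre.length : Int) - 1 - (pre.reverse.idxOf '\n' : Nat)
      (line + nl, length - p)

-- ===== PRECONDITION & SPEC =====
-- A indexes string[i] for every i < length, so it raises IndexError iff length > len(string).
def Pre_advance_line_col_py (string : String) (length : Int) (line : Int) (col : Int) : Prop :=
  length ≤ (string.toList.length : Int)
instance (string : String) (length : Int) (line : Int) (col : Int) : Decidable (Pre_advance_line_col_py string length line col) := by unfold Pre_advance_line_col_py; infer_instance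
def pvWitness_advance_line_col_py : String × Int × Int × Int := ("ab\ncd", 4, 1, 1)

def Spec_advance_line_col_py (string : String) (length : Int) (line : Int) (col : Int) (out : Int × Int) : Prop := out = advance_line_col_py_alt string length line col
instance (string : String) (length : Int) (line : Int) (col : Int) (out : Int × Int) : Decidable (Spec_advance_line_col_py string length line col out) := by unfold Spec_advance_line_col_py; infer_instance

-- ===== CLAIM (what is proved, stated in full; the proofs are below) =====
def Claim_equal_advance_line_col_py : Prop := ∀ (string : String) (length : Int) (line : Int) (col : Int), Dom_advance_line_col_py string length line col → Pre_advance_line_col_py string length line col → Spec_advance_line_col_py string length line col (advance_line_col_py string length line col)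

-- ===== LEMMAS AND PROOFS =====

-- A's loop body, as a step function over the character read
def pvStep (st : Int × Int) (c : Char) : Int × Int :=
  if c == '\n' then (st.1 + 1, 1) else (st.1, st.2 + 1)

-- A's fold over range(n) with indexing equals a fold over the first n characters
theorem pvFoldl_take (xs : List Char) (n : Nat) (hn : n ≤ xs.length) (init : Int × Int) :
    (PySem.List.pyRange 0 (n : Int) 1).foldl
      (fun st i => pvStep st (PySem.List.pyGetD xs i ' ')) init
    = (xs.take n).foldl pvStep init := by
  induction n generalizing init with
  | zero => simp [PySem.List.pyRange_one_eq_nil]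
  | succ m ih =>
    have hm : m < xs.length := by omega
    have hsplit : PySem.List.pyRange 0 ((m : Int) + 1) 1
        = PySem.List.pyRange 0 (m : Int) 1 ++ [(m : Int)] :=
      PySem.List.pyRange_one_succ_right (by exact_mod_cast Nat.zero_le m)
    rw [show ((m + 1 : Nat) : Int) = (m : Int) + 1 by push_cast; ring, hsplit,
      List.foldl_append, ih (by omega)]
    have htake : xs.take (m + 1) = xs.take m ++ [xs[m]] := by
      rw [List.take_add_one]
      simp [List.getElem?_eq_getElem hm]
    rw [htake, List.foldl_append]
    simp [PySem.List.pyGetD_natCast, List.getD, List.getElem?_eq_getElem hm]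

-- closed form of the fold: line gains count '\n'; col is reset by the last '\n'
theorem pvFoldl_closed (cs : List Char) (l c : Int) :
    cs.foldl pvStep (l, c)
    = (l + cs.count '\n',
       if cs.count '\n' = 0 then c + cs.length else (cs.reverse.idxOf '\n' : Int) + 1) := by
  induction cs using List.reverseRecOn with
  | nil => simp
  | append_singleton cs ch ih =>
    rw [List.foldl_append, ih]
    by_cases hc : ch = '\n'
    · subst hc
      simp [pvStep, List.count_append]
      omega
    · have hcount : (cs ++ [ch]).count '\n' = cs.count '\n' := by
        simp [List.count_append, hc]
      have hidx : (cs ++ [ch]).reverse.idxOf '\n' = cs.reverse.idxOf '\n' + 1 := by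
        rw [List.reverse_append]
        simp [hc]
      rw [hcount]
      by_cases h0 : cs.count '\n' = 0
      · simp [pvStep, hc, h0, List.length_append]
        ring
      · simp [pvStep, hc, h0]

-- ===== VERDICT (by name: the statement is the Claim_ definition above) =====
theorem advance_line_col_py_spec : Claim_equal_advance_line_col_py := by
  intro string length line col _ hpre
  unfold Spec_advance_line_col_py advance_line_col_py advance_line_col_py_alt
  by_cases hL : length ≤ 0
  · rw [if_pos hL]
    rw [PySem.List.pyRange_one_eq_nil hL]
    simp
  · rw [if_neg hL]
    have h0 : (0 : Int) ≤ length := by omega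
    have hlen : length.toNat ≤ string.toList.length := by
      unfold Pre_advance_line_col_py at hpre; omega
    have hcast : ((length.toNat : Nat) : Int) = length := Int.toNat_of_nonneg h0
    have hA : (PySem.List.pyRange 0 length 1).foldl
        (fun (st : Int × Int) i =>
          if PySem.List.pyGetD string.toList i ' ' == '\n' then (st.1 + 1, 1) else (st.1, st.2 + 1))
        (line, col)
        = (string.toList.take length.toNat).foldl pvStep (line, col) := by
      rw [← hcast]
      exact pvFoldl_take string.toList length.toNat hlen (line, col)
    have hslice : PySem.List.slice string.toList (some 0) (some length)
        = string.toList.take length.toNat := by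
      rw [PySem.List.slice_zero_start, PySem.List.slice_to string.toList h0]
    rw [hA, pvFoldl_closed, hslice]
    set pre := string.toList.take length.toNat with hpredef
    have hprelen : (pre.length : Int) = length := by
      rw [hpredef, List.length_take, min_eq_left hlen]; exact hcast
    by_cases h0c : pre.count '\n' = 0
    · simp [h0c, hprelen]
    · simp only [if_neg h0c,
        if_neg (show ¬ (pre.count '\n' == 0) = true by simp [h0c])]
      rw [Prod.mk.injEq]
      exact ⟨rfl, by omega⟩
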